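-- pv_equiv track=rewrite | github.com/thehaniyaakhtar/LegacyLeap | backend/legacy_ingestion.py | _detect_field_positions
-- ===== SOURCE A (Python) =====
-- from typing import Dict, List, Any, Optional
--
-- def _detect_field_positions(lines: List[str]) -> Dict[str, tuple]:
--     """Detect field positions in fixed-width file"""
--     if not lines:
--         return {}
--
--     # Use the first line as reference
--     reference_line = lines[0]
--     field_positions = {}
--
--     # Simple heuristic: look for patterns of spaces and non-spaces
--     current_pos = 0
--     field_num = 1
--
--     while current_pos < len(reference_line):
--         # Find start of next field (non-space character)
--         start = current_pos
--         while start < len(reference_line) and reference_line[start].isspace():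
--             start += 1
--
--         if start >= len(reference_line):
--             break
--
--         # Find end of field (space character or end of line)
--         end = start
--         while end < len(reference_line) and not reference_line[end].isspace():
--             end += 1
--
--         field_name = f"FIELD_{field_num}"
--         field_positions[field_name] = (start, end)
--
--         current_pos = end
--         field_num += 1
--
--     return field_positions
-- ===== SOURCE B (Python) =====
-- from typing import Dict, List
--
-- def _detect_field_positions(lines: List[str]) -> Dict[str, tuple]:
--     """Detect field positions in fixed-width file"""
--     if not lines:
--         return {}
--     line = lines[0]
--     n = len(line)
--     # boundary detection: a field starts where a non-space follows start-of-line/space,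
--     # and ends after a non-space followed by end-of-line/space; pair them up by zip
--     starts = [i for i in range(n)
--               if not line[i].isspace() and (i == 0 or line[i - 1].isspace())]
--     ends = [i + 1 for i in range(n)
--             if not line[i].isspace() and (i + 1 == n or line[i + 1].isspace())]
--     return {f"FIELD_{k}": se for k, se in enumerate(zip(starts, ends), start=1)}
-- ===== Notes on version B (the rewrite author's own statement) =====
-- stated objective: alternative
-- what changed: Replaces A's sequential skip-spaces/consume-field while-loop scan by declarative boundary detection: two comprehensions collect field-start and field-end indices from local character-pair tests, and zip pairs them into the fields.
import Mathlib
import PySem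

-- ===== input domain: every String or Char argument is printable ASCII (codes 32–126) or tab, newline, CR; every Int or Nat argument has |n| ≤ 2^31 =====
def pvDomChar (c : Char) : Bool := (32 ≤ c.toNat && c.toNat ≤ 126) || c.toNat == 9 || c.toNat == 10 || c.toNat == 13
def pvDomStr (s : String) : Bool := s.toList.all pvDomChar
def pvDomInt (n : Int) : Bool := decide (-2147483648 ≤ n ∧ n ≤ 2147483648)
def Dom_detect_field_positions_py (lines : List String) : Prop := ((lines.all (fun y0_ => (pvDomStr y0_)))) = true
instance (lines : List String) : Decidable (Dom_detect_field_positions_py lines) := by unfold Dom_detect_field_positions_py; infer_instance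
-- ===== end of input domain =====

-- B replaces A's sequential skip/consume while-loop scan by declarative boundary
-- detection: comprehensions over start/end indices, paired by zip (objective: alternative).

-- ===== PORT A =====

-- 'while i < len ∧ p s[i]: i += 1' — both of A's inner while loops, with p the loop's test
def pvSkip (p : Char → Bool) (s : List Char) (i : Nat) : Nat :=
  if h : i < s.length then
    if p s[i] then pvSkip p s (i + 1) else i
  else i
termination_by s.length - i

-- i ≤ pvSkip p s i  (needed by pvLoopA's termination proof, so it stays above the port)
theorem pvSkip_ge (p : Char → Bool) (s : List Char) (i : Nat) : i ≤ pvSkip p s i := by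
  fun_induction pvSkip p s i with
  | case1 i h hp ih => omega
  | case2 i h hp => exact le_refl i
  | case3 i h => exact le_refl i

theorem pvSkip_succ_le (p : Char → Bool) (s : List Char) (i : Nat)
    (h : i < s.length) (hp : p s[i] = true) : i + 1 ≤ pvSkip p s i := by
  rw [pvSkip]
  simp only [h, dif_pos, hp, if_pos]
  exact pvSkip_ge p s (i + 1)

-- if the scan stops inside the string, the stopping character fails the test
theorem pvSkip_stop (p : Char → Bool) (s : List Char) (i : Nat)
    (h : pvSkip p s i < s.length) : p (s[pvSkip p s i]'h) = false := by
  fun_induction pvSkip p s i with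
  | case1 i hi hp ih => exact ih h
  | case2 i hi hp => simpa using hp
  | case3 i hi => omega

-- A's outer while loop: skip spaces, consume the field, record (start, end), continue at end
def pvLoopA (s : List Char) (pos : Nat) (num : Int) : List (String × Int × Int) :=
  if h : pos < s.length then
    let start := pvSkip PySem.Chars.isspace s pos
    if hs : s.length ≤ start then []
    else
      let e := pvSkip (fun c => !PySem.Chars.isspace c) s start
      ("FIELD_" ++ PySem.Int.toStr num, ((start : Int), (e : Int))) :: pvLoopA s e (num + 1)
  else []
termination_by s.length - pos
decreasing_by
  have h1 : pos ≤ pvSkip PySem.Chars.isspace s pos := pvSkip_ge PySem.Chars.isspace s pos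
  have h2 : pvSkip PySem.Chars.isspace s pos < s.length := by omega
  have h3 := pvSkip_stop PySem.Chars.isspace s pos h2
  have h4 : pvSkip PySem.Chars.isspace s pos + 1 ≤
      pvSkip (fun c => !PySem.Chars.isspace c) s (pvSkip PySem.Chars.isspace s pos) :=
    pvSkip_succ_le (fun c => !PySem.Chars.isspace c) s _ h2 (by simp [h3])
  omega

def detect_field_positions_py (lines : List String) : List (String × Int × Int) :=
  match lines with
  | [] => []
  | l :: _ => pvLoopA l.toList 0 1

-- ===== PORT B =====

-- test of B's `starts` comprehension: non-space preceded by start-of-line or a space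
def pvPS (s : List Char) (i : Nat) : Bool :=
  !(PySem.Chars.isspace (s.getD i ' ')) &&
    (i == 0 || PySem.Chars.isspace (s.getD (i - 1) ' '))

-- test of B's `ends` comprehension: non-space followed by end-of-line or a space
def pvPE (s : List Char) (i : Nat) : Bool :=
  !(PySem.Chars.isspace (s.getD i ' ')) &&
    (i + 1 == s.length || PySem.Chars.isspace (s.getD (i + 1) ' '))

-- starts = [i for i in range(n) if …]
def pvStarts (s : List Char) : List Nat := (List.range s.length).filter (pvPS s)

-- ends = [i + 1 for i in range(n) if …]
def pvEnds (s : List Char) : List Nat := ((List.range s.length).filter (pvPE s)).map (· + 1)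

-- the dict comprehension over enumerate(zip(starts, ends), start=1)
def pvMkFields (num : Int) : List (Nat × Nat) → List (String × Int × Int)
  | [] => []
  | (a, b) :: rest =>
      ("FIELD_" ++ PySem.Int.toStr num, ((a : Int), (b : Int))) :: pvMkFields (num + 1) rest

def detect_field_positions_py_alt (lines : List String) : List (String × Int × Int) :=
  match lines with
  | [] => []
  | l :: _ => pvMkFields 1 ((pvStarts l.toList).zip (pvEnds l.toList))

-- ===== PRECONDITION & SPEC =====
def Spec_detect_field_positions_py (lines : List String) (out : List (String × Int × Int)) : Prop := out = detect_field_positions_py_alt lines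
instance (lines : List String) (out : List (String × Int × Int)) : Decidable (Spec_detect_field_positions_py lines out) := by unfold Spec_detect_field_positions_py; infer_instance

-- ===== CLAIM (what is proved, stated in full; the proofs are below) =====
def Claim_equal_detect_field_positions_py : Prop := ∀ (lines : List String), Dom_detect_field_positions_py lines → Spec_detect_field_positions_py lines (detect_field_positions_py lines)

-- ===== LEMMAS AND PROOFS =====

theorem pvGetD_eq (s : List Char) (i : Nat) (h : i < s.length) : s[i]?.getD ' ' = s[i] := by
  simp [List.getElem?_eq_getElem h]

theorem pvGetD_eq' (s : List Char) (i : Nat) (h : i < s.length) : s.getD i ' ' = s[i] := by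
  rw [List.getD_eq_getElem?_getD, pvGetD_eq s i h]

theorem pvSkip_le (p : Char → Bool) (s : List Char) (i : Nat) (h : i ≤ s.length) :
    pvSkip p s i ≤ s.length := by
  fun_induction pvSkip p s i with
  | case1 i hi hp ih => exact ih (by omega)
  | case2 i hi hp => omega
  | case3 i hi => exact h

-- every character strictly before the stopping point passes the test
theorem pvSkip_mid (p : Char → Bool) (s : List Char) (i j : Nat)
    (h1 : i ≤ j) (h2 : j < pvSkip p s i) (hj : j < s.length) : p s[j] = true := by
  fun_induction pvSkip p s i with
  | case1 i hi hp ih =>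
    by_cases hij : i = j
    · subst hij; exact hp
    · exact ih (by omega) h2
  | case2 i hi hp => omega
  | case3 i hi =>
    have := pvSkip_ge p s i
    omega

theorem pvFilter_nil (p : Nat → Bool) (pos len : Nat)
    (h : ∀ i, pos ≤ i → i < pos + len → p i = false) :
    (List.range' pos len).filter p = [] := by
  rw [List.filter_eq_nil_iff]
  intro i hi
  rw [List.mem_range'_1] at hi
  simp [h i hi.1 hi.2]

theorem pvFilter_single (p : Nat → Bool) (pos len a : Nat)
    (h1 : pos ≤ a) (h2 : a < pos + len)
    (hp : ∀ i, pos ≤ i → i < pos + len → (p i = true ↔ i = a)) :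
    (List.range' pos len).filter p = [a] := by
  induction len generalizing pos with
  | zero => omega
  | succ k ih =>
    rw [List.range'_succ, List.filter_cons]
    by_cases hpa : pos = a
    · subst hpa
      rw [if_pos ((hp pos (le_refl _) (by omega)).mpr rfl)]
      have : (List.range' (pos + 1) k).filter p = [] := by
        apply pvFilter_nil
        intro i hi1 hi2
        by_contra hne
        have := (hp i (by omega) (by omega)).mp (by simpa using hne)
        omega
      rw [this]
    · have hfalse : p pos = false := by
        by_contra hne
        have := (hp pos (le_refl _) (by omega)).mp (by simpa using hne)
        exact hpa this
      rw [if_neg (by simp [hfalse])]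
      exact ih (pos + 1) (by omega) (by omega) (fun i hi1 hi2 => hp i (by omega) (by omega))

theorem pvRange'_split (pos m n : Nat) (h1 : pos ≤ m) (h2 : m ≤ n) :
    List.range' pos (n - pos) = List.range' pos (m - pos) ++ List.range' m (n - m) := by
  have h := @List.range'_append pos (m - pos) (n - m) 1
  rw [show pos + 1 * (m - pos) = m by omega, show (m - pos) + (n - m) = n - pos by omega] at h
  exact h.symm

-- the invariant: pos is 0, past the end, or the scan resumes at a space / after a field
theorem pvMain (s : List Char) (pos : Nat) (num : Int) (hpos : pos ≤ s.length)
    (H : pos = 0 ∨ s.length ≤ pos ∨ PySem.Chars.isspace (s.getD pos ' ') = true ∨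
         PySem.Chars.isspace (s.getD (pos - 1) ' ') = true) :
    pvLoopA s pos num =
      pvMkFields num
        (((List.range' pos (s.length - pos)).filter (pvPS s)).zip
          ((((List.range' pos (s.length - pos)).filter (pvPE s)).map (· + 1)))) := by
  by_cases hlt : pos < s.length
  · rw [pvLoopA]
    simp only [dif_pos hlt]
    have hps : pos ≤ pvSkip PySem.Chars.isspace s pos := pvSkip_ge _ _ _
    have hsle : pvSkip PySem.Chars.isspace s pos ≤ s.length := pvSkip_le _ _ _ (by omega)
    have hspace : ∀ j, pos ≤ j → j < pvSkip PySem.Chars.isspace s pos → (hj : j < s.length) →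
        PySem.Chars.isspace s[j] = true := fun j hj1 hj2 hj3 => pvSkip_mid _ _ _ _ hj1 hj2 hj3
    set start := pvSkip PySem.Chars.isspace s pos with hstartdef
    by_cases hs : s.length ≤ start
    · rw [dif_pos hs]
      -- all of [pos, n) is spaces: no field starts, so B is empty too
      have hfn : (List.range' pos (s.length - pos)).filter (pvPS s) = [] := by
        apply pvFilter_nil
        intro i hi1 hi2
        have hiL : i < s.length := by omega
        have hsp : PySem.Chars.isspace s[i] = true := hspace i hi1 (by omega) hiL
        simp [pvPS, pvGetD_eq s i hiL, hsp]
      rw [hfn]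
      simp [pvMkFields]
    · rw [dif_neg hs]
      have hsL : start < s.length := by omega
      have hnsp : PySem.Chars.isspace s[start] = false := pvSkip_stop _ _ _ hsL
      have hse : start + 1 ≤ pvSkip (fun c => !PySem.Chars.isspace c) s start :=
        pvSkip_succ_le _ _ _ hsL (by simp [hnsp])
      have heL : pvSkip (fun c => !PySem.Chars.isspace c) s start ≤ s.length :=
        pvSkip_le _ _ _ (by omega)
      have hfield : ∀ j, start ≤ j → j < pvSkip (fun c => !PySem.Chars.isspace c) s start →
          (hj : j < s.length) → PySem.Chars.isspace s[j] = false := by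
        intro j hj1 hj2 hj3
        have := pvSkip_mid (fun c => !PySem.Chars.isspace c) s start j hj1 hj2 hj3
        simpa using this
      have hestop : ∀ hh : pvSkip (fun c => !PySem.Chars.isspace c) s start < s.length,
          PySem.Chars.isspace (s[pvSkip (fun c => !PySem.Chars.isspace c) s start]'hh) = true := by
        intro hh
        have := pvSkip_stop (fun c => !PySem.Chars.isspace c) s start hh
        simpa using this
      set e := pvSkip (fun c => !PySem.Chars.isspace c) s start with hedef
      -- split the range at e
      rw [pvRange'_split pos e s.length (by omega) heL, List.filter_append, List.filter_append]
      -- starts on [pos, e) = [start]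
      have hfs : (List.range' pos (e - pos)).filter (pvPS s) = [start] := by
        apply pvFilter_single _ _ _ _ hps (by omega)
        intro i hi1 hi2
        have hiL : i < s.length := by omega
        constructor
        · intro hpi
          by_contra hne
          rcases Nat.lt_or_ge i start with hlt' | hge
          · -- i before start: a space, pvPS is false
            have hsp : PySem.Chars.isspace s[i] = true := hspace i hi1 hlt' hiL
            simp [pvPS, pvGetD_eq s i hiL, hsp] at hpi
          · -- start < i < e: previous char non-space and i ≠ 0
            have hgt : start < i := by omega
            have hi0 : i ≠ 0 := by omega
            have hprevL : i - 1 < s.length := by omega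
            have hprev : PySem.Chars.isspace s[i-1] = false :=
              hfield (i - 1) (by omega) (by omega) hprevL
            simp [pvPS, pvGetD_eq s i hiL, pvGetD_eq s (i-1) hprevL, hprev, hi0] at hpi
        · intro hieq
          rw [hieq]
          simp only [pvPS, List.getD_eq_getElem?_getD, pvGetD_eq s start hsL, hnsp,
            Bool.not_false, Bool.true_and, Bool.or_eq_true, beq_iff_eq]
          by_cases hs0 : start = 0
          · exact Or.inl hs0
          · right
            have hprevL : start - 1 < s.length := by omega
            rw [pvGetD_eq s (start - 1) hprevL]
            rcases Nat.lt_or_ge pos start with hplt | hpge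
            · exact hspace (start - 1) (by omega) (by omega) hprevL
            · -- start = pos > 0: use the invariant H
              have hip : start = pos := by omega
              have hcast : s[start - 1] = s[pos - 1]'(by omega) := getElem_congr rfl (by omega) (by omega)
              rcases H with h0 | hend | hsp | hprev
              · omega
              · omega
              · rw [pvGetD_eq' s pos hlt] at hsp
                have : s[start] = s[pos]'hlt := getElem_congr rfl hip hsL
                rw [this, hsp] at hnsp
                exact absurd hnsp (by simp)
              · rw [pvGetD_eq' s (pos - 1) (by omega)] at hprev
                rw [hcast]
                exact hprev
      -- ends on [pos, e) = [e - 1]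
      have hfe : (List.range' pos (e - pos)).filter (pvPE s) = [e - 1] := by
        apply pvFilter_single _ _ _ _ (by omega) (by omega)
        intro i hi1 hi2
        have hiL : i < s.length := by omega
        constructor
        · intro hpi
          by_contra hne
          rcases Nat.lt_or_ge i start with hlt' | hge
          · have hsp : PySem.Chars.isspace s[i] = true := hspace i hi1 hlt' hiL
            simp [pvPE, pvGetD_eq s i hiL, hsp] at hpi
          · -- start ≤ i < e - 1: next char non-space and i+1 ≠ n
            have hi1e : i + 1 < e := by omega
            have hnextL : i + 1 < s.length := by omega
            have hnext : PySem.Chars.isspace s[i+1] = false :=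
              hfield (i + 1) (by omega) hi1e hnextL
            have hn1 : i + 1 ≠ s.length := by omega
            simp [pvPE, pvGetD_eq s i hiL, pvGetD_eq s (i+1) hnextL, hnext, hn1] at hpi
        · intro hieq
          rw [hieq]
          have he1L : e - 1 < s.length := by omega
          have hlast : PySem.Chars.isspace s[e-1] = false :=
            hfield (e - 1) (by omega) (by omega) he1L
          simp only [pvPE, List.getD_eq_getElem?_getD, pvGetD_eq s (e-1) he1L, hlast,
            Bool.not_false, Bool.true_and, Bool.or_eq_true, beq_iff_eq]
          have he1 : e - 1 + 1 = e := by omega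
          rw [he1]
          rcases Nat.lt_or_ge e s.length with heLt | heGe
          · right
            rw [pvGetD_eq s e heLt]
            exact hestop heLt
          · exact Or.inl (by omega)
      rw [hfs, hfe]
      simp only [List.map_cons, List.singleton_append, List.zip_cons_cons, pvMkFields]
      have he1 : e - 1 + 1 = e := by omega
      rw [he1]
      congr 1
      have hrec := pvMain s e (num + 1) heL (by
        rcases Nat.lt_or_ge e s.length with heLt | heGe
        · right; right; left
          rw [pvGetD_eq' s e heLt]
          exact hestop heLt
        · right; left; omega)
      simpa using hrec
  · rw [pvLoopA]
    simp only [dif_neg hlt]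
    rw [show s.length - pos = 0 by omega]
    simp [pvMkFields]
termination_by s.length - pos
decreasing_by
  have h2 : pvSkip PySem.Chars.isspace s pos + 1 ≤
      pvSkip (fun c => !PySem.Chars.isspace c) s (pvSkip PySem.Chars.isspace s pos) :=
    pvSkip_succ_le _ _ _ (by omega)
      (by simp [pvSkip_stop PySem.Chars.isspace s pos (by omega)])
  omega

-- ===== VERDICT (by name: the statement is the Claim_ definition above) =====
theorem detect_field_positions_py_spec : Claim_equal_detect_field_positions_py := by
  intro lines _
  unfold Spec_detect_field_positions_py detect_field_positions_py detect_field_positions_py_alt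
  cases lines with
  | nil => rfl
  | cons l t =>
    show pvLoopA l.toList 0 1 = pvMkFields 1 ((pvStarts l.toList).zip (pvEnds l.toList))
    have h := pvMain l.toList 0 1 (by omega) (Or.inl rfl)
    rw [h]
    unfold pvStarts pvEnds
    rw [List.range_eq_range']
    simp
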